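-- pv_equiv track=rewrite | github.com/haixiangyan/leetcode-python | Amazon 2019秋招面试高频题/3 - Amazon 电面 Follow up/679. Unique Paths III.py | uniqueWeightedPaths
-- ===== SOURCE A (Python) =====
-- def uniqueWeightedPaths(grid):
--     rows, cols = len(grid), len(grid[0])
--     dp = [[set() for _ in range(cols)] for _ in range(rows)]
--
--     if rows == 0 or cols == 0:
--         return 0
--
--     for i in range(rows):
--         for j in range(cols):
--             if i == 0 and j == 0:
--                 dp[i][j].add(grid[i][j])
--             else:
--                 for value in dp[i - 1][j]:
--                     dp[i][j].add(value + grid[i][j])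
--                 for value in dp[i][j - 1]:
--                     dp[i][j].add(value + grid[i][j])
--
--     weights = 0
--     for value in dp[-1][-1]:
--         weights += value
--
--     return weights
-- ===== SOURCE B (Python) =====
-- def uniqueWeightedPaths(grid):
--     rows, cols = len(grid), len(grid[0])
--     if rows == 0 or cols == 0:
--         return 0
--     memo = {}
--
--     def reach(i, j):
--         if (i, j) in memo:
--             return memo[(i, j)]
--         if i == 0 and j == 0:
--             s = {grid[0][0]}
--         else:
--             s = set()
--             if i > 0:
--                 s |= {v + grid[i][j] for v in reach(i - 1, j)}
--             if j > 0:
--                 s |= {v + grid[i][j] for v in reach(i, j - 1)}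
--         memo[(i, j)] = s
--         return s
--
--     return sum(reach(rows - 1, cols - 1))
-- ===== Notes on version B (the rewrite author's own statement) =====
-- stated objective: alternative
-- what changed: Replaces A's bottom-up preallocated 2D table of sets filled by nested index loops (with negative-index wraparound reads) by a top-down memoized recursion reach(i,j) from the target cell back to the corner, caching each cell's set of path sums in a dict.
-- outside the precondition, e.g. on uniqueWeightedPaths([]): A raises IndexError, B raises IndexError; on uniqueWeightedPaths([[1, 2], [3]]): A raises IndexError, B raises IndexError; on uniqueWeightedPaths([[5], [7]]): A raises RuntimeError, B returns 12
import Mathlib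
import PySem

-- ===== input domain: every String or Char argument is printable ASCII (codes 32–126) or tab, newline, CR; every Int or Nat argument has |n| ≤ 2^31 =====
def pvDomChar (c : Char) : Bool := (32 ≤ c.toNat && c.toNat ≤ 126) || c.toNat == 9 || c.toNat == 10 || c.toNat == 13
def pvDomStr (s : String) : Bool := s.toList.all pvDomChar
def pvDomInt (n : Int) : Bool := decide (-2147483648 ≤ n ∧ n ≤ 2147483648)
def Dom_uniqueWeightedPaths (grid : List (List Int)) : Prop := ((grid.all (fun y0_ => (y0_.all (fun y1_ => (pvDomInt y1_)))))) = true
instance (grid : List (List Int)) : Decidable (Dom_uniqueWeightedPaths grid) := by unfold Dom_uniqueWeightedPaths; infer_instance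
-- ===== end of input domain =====

-- B replaces A's bottom-up preallocated 2D table of sets (nested index loops, negative-index
-- wraparound reads) by a top-down memoized recursion from the target cell back to the corner:
-- a different decomposition of the same exact computation (return value only; neither mutates input).


-- ===== PORT A =====
-- dp[i][j] = v  (dict/list double assignment used by A's mutation dp[i][j].add / in-place fill)
def pvSetCell (dp : List (List (PySem.Set Int))) (i j : Int) (v : PySem.Set Int) :
    List (List (PySem.Set Int)) :=
  PySem.List.pySetD dp i (PySem.List.pySetD (PySem.List.pyGetD dp i []) j v)

-- the body of A's inner (j) loop
def pvStepA (grid : List (List Int)) (i : Int) (dp : List (List (PySem.Set Int))) (j : Int) :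
    List (List (PySem.Set Int)) :=
  let g := PySem.List.pyGetD (PySem.List.pyGetD grid i []) j 0
  if i == 0 && j == 0 then
    pvSetCell dp i j (PySem.Set.add (PySem.List.pyGetD (PySem.List.pyGetD dp i []) j PySem.Set.empty) g)
  else
    let cell := PySem.List.pyGetD (PySem.List.pyGetD dp i []) j PySem.Set.empty
    let cell := (PySem.List.pyGetD (PySem.List.pyGetD dp (i-1) []) j PySem.Set.empty).foldl
      (fun c v => PySem.Set.add c (v + g)) cell
    let cell := (PySem.List.pyGetD (PySem.List.pyGetD dp i []) (j-1) PySem.Set.empty).foldl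
      (fun c v => PySem.Set.add c (v + g)) cell
    pvSetCell dp i j cell

def uniqueWeightedPaths (grid : List (List Int)) : Int :=
  let rows : Int := PySem.List.len grid
  let cols : Int := PySem.List.len (PySem.List.pyGetD grid 0 [])
  let dp : List (List (PySem.Set Int)) :=
    (PySem.List.pyRange 0 rows).map (fun _ => (PySem.List.pyRange 0 cols).map (fun _ => PySem.Set.empty))
  if rows == 0 || cols == 0 then 0
  else
    let dp := (PySem.List.pyRange 0 rows).foldl
      (fun dp i => (PySem.List.pyRange 0 cols).foldl (pvStepA grid i) dp) dp
    (PySem.List.pyGetD (PySem.List.pyGetD dp (-1) []) (-1) PySem.Set.empty).foldl (· + ·) 0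

-- ===== PORT B =====
-- B's memoized recursion reach(i, j): the set of path sums from (0,0) to (i,j), cached in memo.
-- (Python's int indices are always ≥ 0 along the recursion — guards i > 0 / j > 0 — so Nat indices
-- are exact; the memo dict is keyed by the (i, j) pair as in Source B.)
def pvReach (grid : List (List Int)) (fuel i j : Nat)
    (memo : PySem.Dict (Int × Int) (PySem.Set Int)) :
    PySem.Dict (Int × Int) (PySem.Set Int) × PySem.Set Int :=
  match fuel with
  | 0 => (memo, PySem.Set.empty)  -- fuel is only a totality guard: every call has i + j < fuel
  | fuel + 1 =>
    match memo.get? ((i : Int), (j : Int)) with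
    | some s => (memo, s)
    | none =>
      if i = 0 ∧ j = 0 then
        let s := PySem.Set.ofList [PySem.List.pyGetD (PySem.List.pyGetD grid 0 []) 0 0]
        (memo.insert ((i : Int), (j : Int)) s, s)
      else
        let g := PySem.List.pyGetD (PySem.List.pyGetD grid (i : Int) []) (j : Int) 0
        let p1 :=
          if 0 < i then
            let r := pvReach grid fuel (i - 1) j memo
            (r.1, PySem.Set.union PySem.Set.empty (PySem.Set.ofList (r.2.map (fun v => v + g))))
          else (memo, (PySem.Set.empty : PySem.Set Int))
        let p2 :=
          if 0 < j then
            let r := pvReach grid fuel i (j - 1) p1.1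
            (r.1, PySem.Set.union p1.2 (PySem.Set.ofList (r.2.map (fun v => v + g))))
          else p1
        (p2.1.insert ((i : Int), (j : Int)) p2.2, p2.2)

def uniqueWeightedPaths_alt (grid : List (List Int)) : Int :=
  let rows : Int := PySem.List.len grid
  let cols : Int := PySem.List.len (PySem.List.pyGetD grid 0 [])
  if rows == 0 || cols == 0 then 0
  else
    let ti := (rows - 1).toNat
    let tj := (cols - 1).toNat
    (pvReach grid (ti + tj + 1) ti tj PySem.Dict.empty).2.sum

-- ===== PRECONDITION & SPEC =====
-- Pre_ excludes exactly the inputs on which the Python A raises: the empty grid (IndexError from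
-- grid[0]), grids with a row shorter than the first row (IndexError on grid[i][j]), and
-- single-column grids with a nonzero entry below the first row (RuntimeError: dp[i][-1] wraps to
-- the very set being filled, which then changes size during iteration).
def Pre_uniqueWeightedPaths (grid : List (List Int)) : Prop :=
  grid ≠ [] ∧ (∀ row ∈ grid, (grid.headD []).length ≤ row.length) ∧
    ¬((grid.headD []).length = 1 ∧ ∃ row ∈ grid.tail, row.headD 0 ≠ 0)
instance (grid : List (List Int)) : Decidable (Pre_uniqueWeightedPaths grid) := by
  unfold Pre_uniqueWeightedPaths; infer_instance

def pvWitness_uniqueWeightedPaths : List (List Int) := [[1, 2], [3, 4]]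

def Spec_uniqueWeightedPaths (grid : List (List Int)) (out : Int) : Prop :=
  out = uniqueWeightedPaths_alt grid
instance (grid : List (List Int)) (out : Int) : Decidable (Spec_uniqueWeightedPaths grid out) := by
  unfold Spec_uniqueWeightedPaths; infer_instance

-- ===== CLAIM (what is proved, stated in full; the proofs are below) =====
def Claim_equal_uniqueWeightedPaths : Prop := ∀ (grid : List (List Int)),
  Dom_uniqueWeightedPaths grid → Pre_uniqueWeightedPaths grid →
    Spec_uniqueWeightedPaths grid (uniqueWeightedPaths grid)

-- ===== LEMMAS AND PROOFS =====

-- ---- proof-side model of the dp: rows built left to right, cells recursively (used to relate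
-- ---- A's table fill and B's memoized recursion to one common description) ----

-- the body of the row builder: append the set of path sums for cell j of the current row
def pvStepB (prev : Option (List (PySem.Set Int))) (row : List Int)
    (cur : List (PySem.Set Int)) (j : Int) : List (PySem.Set Int) :=
  let preds : PySem.Set Int :=
    if prev.isNone && j == 0 then PySem.Set.ofList [(0 : Int)]
    else
      let p : PySem.Set Int :=
        match prev with
        | some pr => PySem.Set.union PySem.Set.empty (PySem.List.pyGetD pr j PySem.Set.empty)
        | none => PySem.Set.empty
      if cur.isEmpty then p else PySem.Set.union p (PySem.List.pyGetD cur (-1) PySem.Set.empty)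
  cur ++ [PySem.Set.ofList (preds.map (fun v => v + PySem.List.pyGetD row j 0))]

-- one row of the model dp
def pvExtendRow (cols : Int) (prev : Option (List (PySem.Set Int))) (row : List Int) :
    List (PySem.Set Int) :=
  (PySem.List.pyRange 0 cols).foldl (pvStepB prev row) []

-- the model's rows, one after the other (prev threaded forward)
def pvBRows (cols : Int) (prev : Option (List (PySem.Set Int))) (rs : List (List Int)) :
    List (List (PySem.Set Int)) :=
  match rs with
  | [] => []
  | r :: rs => pvExtendRow cols prev r :: pvBRows cols (some (pvExtendRow cols prev r)) rs

theorem length_pvBRows (cols : Int) (prev : Option (List (PySem.Set Int))) (rs : List (List Int)) :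
    (pvBRows cols prev rs).length = rs.length := by
  induction rs generalizing prev with
  | nil => rfl
  | cons r rs ih => simp [pvBRows, ih]

theorem pvBRows_append (cols : Int) (p : Option (List (PySem.Set Int))) (d e : List (List Int)) :
    pvBRows cols p (d ++ e) =
      pvBRows cols p d ++ pvBRows cols (((pvBRows cols p d).getLast?).or p) e := by
  induction d generalizing p with
  | nil => simp [pvBRows]
  | cons x d ih =>
    simp only [List.cons_append, pvBRows, ih (some (pvExtendRow cols p x)), List.getLast?_cons]
    rw [← Option.or_some, Option.or_assoc]
    simp

-- generic list plumbing for the 2D write/read at row D.length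
theorem getD_append_mid {α : Type} (D : List α) (R : α) (E : List α) (d : α) :
    (D ++ R :: E).getD D.length d = R := by
  induction D with
  | nil => rfl
  | cons x D ih => simpa using ih

theorem getD_append_lt {α : Type} (D : List α) (rest : List α) (j : Nat) (d : α)
    (h : j < D.length) : (D ++ rest).getD j d = D.getD j d := by
  induction D generalizing j with
  | nil => simp at h
  | cons x D ih =>
    cases j with
    | zero => rfl
    | succ j => simpa using ih j (by simpa using h)

theorem set_append_mid {α : Type} (D : List α) (R : α) (E : List α) (v : α) :
    (D ++ R :: E).set D.length v = D ++ v :: E := by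
  induction D with
  | nil => rfl
  | cons x D ih => simpa using ih

-- building set(l) commutes with the injective shift (+g)
theorem ofList_map_addg (g : Int) (l : List Int) :
    PySem.Set.ofList (l.map (fun v => v + g)) = (PySem.Set.ofList l).map (fun v => v + g) := by
  induction l using List.reverseRecOn with
  | nil => rfl
  | append_singleton l x ih =>
    rw [List.map_append, List.map_cons, List.map_nil, PySem.Set.ofList_append_singleton,
      PySem.Set.ofList_append_singleton, ih, PySem.Set.add_eq_ite, PySem.Set.add_eq_ite]
    by_cases hx : x ∈ PySem.Set.ofList l
    · have : x + g ∈ (PySem.Set.ofList l).map (fun v => v + g) := List.mem_map_of_mem hx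
      simp [hx, this]
    · have : x + g ∉ (PySem.Set.ofList l).map (fun v => v + g) := by
        intro hm
        rcases List.mem_map.mp hm with ⟨y, hy, hxy⟩
        have : y = x := by omega
        exact hx (this ▸ hy)
      simp [hx, this]

-- A's fold-add of (v+g) over p then q, starting empty, is the model's set comprehension over the union
theorem cell_eq (p q : List Int) (g : Int) :
    q.foldl (fun c v => PySem.Set.add c (v + g))
        (p.foldl (fun c v => PySem.Set.add c (v + g)) ([] : PySem.Set Int)) =
      PySem.Set.ofList ((PySem.Set.union (PySem.Set.ofList p) q).map (fun v => v + g)) := by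
  have hfold : ∀ (l : List Int) (s : PySem.Set Int),
      l.foldl (fun c v => PySem.Set.add c (v + g)) s =
        PySem.Set.update s (l.map (fun v => v + g)) := by
    intro l s; simp [PySem.Set.update, List.foldl_map]
  have hunion : PySem.Set.union (PySem.Set.ofList p) q = PySem.Set.ofList (p ++ q) := by
    rw [PySem.Set.ofList_append]; rfl
  rw [hfold, hfold, hunion, ofList_map_addg]
  show PySem.Set.update (PySem.Set.update ([] : PySem.Set Int) (p.map _)) (q.map _) = _
  rw [← PySem.Set.update_append, ← List.map_append]
  rw [show PySem.Set.update ([] : PySem.Set Int) ((p ++ q).map (fun v => v + g)) =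
        PySem.Set.ofList ((p ++ q).map (fun v => v + g)) from rfl]
  rw [ofList_map_addg, PySem.Set.ofList_ofList]

theorem getD_last_of_getLast? {α : Type} (l : List α) (pr d : α) (h : l.getLast? = some pr) :
    l.getD (l.length - 1) d = pr := by
  rw [List.getD_eq_getElem?_getD, ← List.getLast?_eq_getElem?, h]; rfl

theorem getD_pred_getLast {α : Type} (l : List α) (d : α) (h : l ≠ []) :
    l.getD (l.length - 1) d = l.getLast h := by
  rw [List.getD_eq_getElem?_getD, ← List.getLast?_eq_getElem?, List.getLast?_eq_some_getLast h]
  rfl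

theorem getD_replicate {α : Type} (n j : Nat) (a : α) : (List.replicate n a).getD j a = a := by
  rw [List.getD_eq_getElem?_getD, List.getElem?_replicate]; split <;> rfl

theorem getLast_append_replicate {α : Type} (l : List α) (n : Nat) (a : α)
    (h : l ++ List.replicate (n+1) a ≠ []) : (l ++ List.replicate (n+1) a).getLast h = a := by
  rw [List.getLast_append_of_ne_nil h (by simp)]; exact List.getLast_replicate _

-- one step of A's inner loop, on the invariant state, is one step of the model's row construction
theorem stepA_eq (grid : List (List Int)) (c k : Nat)
    (D E : List (List (PySem.Set Int))) (prev : Option (List (PySem.Set Int)))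
    (r : List Int) (cur : List (PySem.Set Int))
    (hprev : (prev = none ∧ D = []) ∨ (∃ pr, prev = some pr ∧ D.getLast? = some pr))
    (hE : ∃ m, E = List.replicate m (List.replicate c PySem.Set.empty))
    (hr : r = PySem.List.pyGetD grid (D.length : Int) []) :
    pvStepA grid (D.length : Int)
        (D ++ (cur ++ List.replicate (k+1) PySem.Set.empty) :: E) (cur.length : Int)
      = D ++ (pvStepB prev r cur (cur.length : Int) ++ List.replicate k PySem.Set.empty) :: E := by
  rcases hE with ⟨m, hE⟩
  rcases hprev with ⟨hpnone, hDnil⟩ | ⟨pr, hpsome, hlast⟩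
  · subst hpnone; subst hDnil
    simp only [List.length_nil, Nat.cast_zero] at hr ⊢
    subst hr
    by_cases hcur : cur = []
    · subst hcur
      simp only [pvStepA, pvStepB, pvSetCell, List.nil_append, List.replicate_succ,
        List.length_nil, Nat.cast_zero]
      simp [PySem.List.pyGetD_zero_cons, PySem.List.pySetD_of_nonneg, PySem.Set.add,
        PySem.Set.ofList, PySem.Set.contains]
    · have hlen : cur.length ≠ 0 := by simpa using hcur
      have hcond : (((0:Int) == 0) && ((cur.length : Int) == 0)) = false := by
        simp [hlen]
      have hR : cur ++ List.replicate (k+1) PySem.Set.empty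
          = cur ++ PySem.Set.empty :: List.replicate k PySem.Set.empty := by
        rw [List.replicate_succ]
      have hcell0 : PySem.List.pyGetD (cur ++ List.replicate (k+1) PySem.Set.empty)
          (cur.length : Int) PySem.Set.empty = PySem.Set.empty := by
        rw [PySem.List.pyGetD_natCast, hR]
        exact getD_append_mid cur _ _ _
      have habove : PySem.List.pyGetD
          (PySem.List.pyGetD ((cur ++ List.replicate (k+1) PySem.Set.empty) :: E) (-1) [])
          (cur.length : Int) PySem.Set.empty = PySem.Set.empty := by
        rw [PySem.List.pyGetD_neg_one _ _ (List.cons_ne_nil _ _)]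
        subst hE
        cases m with
        | zero => simpa using hcell0
        | succ m' =>
          have hgl : ((cur ++ List.replicate (k+1) PySem.Set.empty) ::
              List.replicate (m'+1) (List.replicate c PySem.Set.empty)).getLast
                (List.cons_ne_nil _ _) = List.replicate c PySem.Set.empty := by
            have := getLast_append_replicate [cur ++ List.replicate (k+1) PySem.Set.empty] m'
              (List.replicate c PySem.Set.empty) (by simp)
            simpa using this
          rw [hgl, PySem.List.pyGetD_natCast]
          exact getD_replicate c cur.length PySem.Set.empty
      have hleft : PySem.List.pyGetD (cur ++ List.replicate (k+1) PySem.Set.empty)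
          ((cur.length : Int) - 1) PySem.Set.empty = cur.getLast hcur := by
        have hcast : ((cur.length : Int) - 1) = ((cur.length - 1 : Nat) : Int) := by omega
        rw [hcast, PySem.List.pyGetD_natCast, getD_append_lt cur _ _ _ (by omega)]
        exact getD_pred_getLast cur _ hcur
      have hie : cur.isEmpty = false := by simp [hcur]
      simp only [pvStepA, pvStepB, pvSetCell, List.nil_append, Nat.cast_zero, zero_sub, hcond,
        Bool.false_eq_true, if_false, PySem.List.pyGetD_zero_cons, hcell0, habove, hleft,
        Option.isNone_none, Bool.true_and, beq_iff_eq, Int.natCast_eq_zero, hlen,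
        hie, PySem.List.pyGetD_neg_one _ _ hcur]
      simp only [show (PySem.Set.empty : PySem.Set Int) = [] from rfl] at hR ⊢
      rw [cell_eq]
      rw [PySem.List.pySetD_natCast, hR, set_append_mid]
      rw [show ((cur ++ [] :: List.replicate k []) :: E)
            = [] ++ ((cur ++ [] :: List.replicate k []) :: E) from rfl,
        show (0:Int) = ((List.length ([] : List (List (PySem.Set Int))) : Nat) : Int) from rfl,
        PySem.List.pySetD_natCast, set_append_mid]
      simp [show (PySem.Set.ofList ([] : List Int)) = [] from rfl]
  · subst hpsome; subst hr
    have hDne : D ≠ [] := by intro h; rw [h] at hlast; simp at hlast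
    have hDpos : 0 < D.length := List.length_pos_of_ne_nil hDne
    have hcond : (((D.length : Int) == 0) && ((cur.length : Int) == 0)) = false := by
      have : ((D.length : Int) == 0) = false := by simp; omega
      simp [this]
    have hR : cur ++ List.replicate (k+1) PySem.Set.empty
        = cur ++ PySem.Set.empty :: List.replicate k PySem.Set.empty := by
      rw [List.replicate_succ]
    have hdpi : PySem.List.pyGetD (D ++ (cur ++ List.replicate (k+1) PySem.Set.empty) :: E)
        (D.length : Int) [] = cur ++ List.replicate (k+1) PySem.Set.empty := by
      rw [PySem.List.pyGetD_natCast]; exact getD_append_mid D _ E []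
    have hcell0 : PySem.List.pyGetD (cur ++ List.replicate (k+1) PySem.Set.empty)
        (cur.length : Int) PySem.Set.empty = PySem.Set.empty := by
      rw [PySem.List.pyGetD_natCast, hR]
      exact getD_append_mid cur _ _ _
    have habove : PySem.List.pyGetD (D ++ (cur ++ List.replicate (k+1) PySem.Set.empty) :: E)
        ((D.length : Int) - 1) [] = pr := by
      have hcast : ((D.length : Int) - 1) = ((D.length - 1 : Nat) : Int) := by omega
      rw [hcast, PySem.List.pyGetD_natCast, getD_append_lt D _ _ _ (by omega)]
      exact getD_last_of_getLast? D pr [] hlast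
    by_cases hcur : cur = []
    · have hleft : PySem.List.pyGetD (cur ++ List.replicate (k+1) PySem.Set.empty)
          ((cur.length : Int) - 1) PySem.Set.empty = PySem.Set.empty := by
        have hcast : ((cur.length : Int) - 1) = -1 := by simp [hcur]
        rw [hcast, PySem.List.pyGetD_neg_one _ _ (by simp)]
        exact getLast_append_replicate cur k PySem.Set.empty _
      have hie : cur.isEmpty = true := by simp [hcur]
      simp only [pvStepA, pvStepB, pvSetCell, hcond, Bool.false_eq_true, if_false, hdpi, hcell0,
        habove, hleft, hie, if_true, Option.isNone_some, Bool.false_and, List.foldl_nil]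
      simp only [show (PySem.Set.empty : PySem.Set Int) = [] from rfl] at hR ⊢
      have hce := cell_eq (PySem.List.pyGetD pr (cur.length : Int) [])
        [] (PySem.List.pyGetD (PySem.List.pyGetD grid (D.length : Int) []) (cur.length : Int) 0)
      simp only [List.foldl_nil] at hce
      rw [hce]
      rw [PySem.List.pySetD_natCast, hR, set_append_mid, PySem.List.pySetD_natCast,
        set_append_mid]
      simp [show (PySem.Set.ofList ([] : List Int)) = [] from rfl, PySem.Set.union,
        PySem.Set.update, ← PySem.Set.ofList_eq_foldl]
    · have hlen : cur.length ≠ 0 := by simpa using hcur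
      have hleft : PySem.List.pyGetD (cur ++ List.replicate (k+1) PySem.Set.empty)
          ((cur.length : Int) - 1) PySem.Set.empty = cur.getLast hcur := by
        have hcast : ((cur.length : Int) - 1) = ((cur.length - 1 : Nat) : Int) := by omega
        rw [hcast, PySem.List.pyGetD_natCast, getD_append_lt cur _ _ _ (by omega)]
        exact getD_pred_getLast cur _ hcur
      have hie : cur.isEmpty = false := by simp [hcur]
      simp only [pvStepA, pvStepB, pvSetCell, hcond, Bool.false_eq_true, if_false, hdpi, hcell0,
        habove, hleft, hie, Option.isNone_some, Bool.false_and,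
        PySem.List.pyGetD_neg_one _ _ hcur]
      simp only [show (PySem.Set.empty : PySem.Set Int) = [] from rfl] at hR ⊢
      rw [cell_eq]
      rw [PySem.List.pySetD_natCast, hR, set_append_mid, PySem.List.pySetD_natCast,
        set_append_mid]
      simp [show (PySem.Set.ofList ([] : List Int)) = [] from rfl, PySem.Set.union,
        PySem.Set.update, ← PySem.Set.ofList_eq_foldl]

-- the inner (j) loop invariant: A fills row D.length cell by cell exactly as the model builds it
theorem inner_inv (grid : List (List Int)) (c : Nat)
    (D E : List (List (PySem.Set Int))) (prev : Option (List (PySem.Set Int))) (r : List Int)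
    (hprev : (prev = none ∧ D = []) ∨ (∃ pr, prev = some pr ∧ D.getLast? = some pr))
    (hE : ∃ m, E = List.replicate m (List.replicate c PySem.Set.empty))
    (hr : r = PySem.List.pyGetD grid (D.length : Int) []) :
    ∀ (k : Nat) (cur : List (PySem.Set Int)),
      (List.range' cur.length k).foldl (fun dp (jn : Nat) => pvStepA grid (D.length : Int) dp (jn : Int))
          (D ++ (cur ++ List.replicate k PySem.Set.empty) :: E)
        = D ++ ((List.range' cur.length k).foldl
            (fun cu (jn : Nat) => pvStepB prev r cu (jn : Int)) cur) :: E := by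
  intro k
  induction k with
  | zero => intro cur; simp
  | succ k ih =>
    intro cur
    rw [List.range'_succ, List.foldl_cons, List.foldl_cons,
      stepA_eq grid c k D E prev r cur hprev hE hr]
    have hlen : (pvStepB prev r cur (cur.length : Int)).length = cur.length + 1 := by
      simp [pvStepB]
    have := ih (pvStepB prev r cur (cur.length : Int))
    rw [hlen] at this
    exact this

-- the model's inner loop, rewritten over List.range'
theorem pvExtendRow_eq_range' (c : Nat) (prev : Option (List (PySem.Set Int))) (row : List Int) :
    pvExtendRow ((c : Nat) : Int) prev row =
      (List.range' 0 c).foldl (fun cu (jn : Nat) => pvStepB prev row cu (jn : Int)) [] := by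
  rw [pvExtendRow, PySem.List.pyRange_zero_natCast, List.foldl_map, List.range_eq_range']

-- a fold over range(c) of Ints is a fold over List.range' of Nats
theorem pyRange_foldl_eq {β : Type} (c : Nat) (f : β → Int → β) (init : β) :
    (PySem.List.pyRange 0 ((c : Nat) : Int)).foldl f init =
      (List.range' 0 c).foldl (fun b (jn : Nat) => f b (jn : Int)) init := by
  rw [PySem.List.pyRange_zero_natCast, List.foldl_map, List.range_eq_range']

-- the outer (i) loop invariant
theorem outer_inv (c : Nat) (done rest : List (List Int)) :
    (List.range' done.length rest.length).foldl
        (fun dp (i : Nat) => (PySem.List.pyRange 0 ((c : Nat) : Int)).foldl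
          (pvStepA (done ++ rest) (i : Int)) dp)
        (pvBRows ((c : Nat) : Int) none done ++
          List.replicate rest.length (List.replicate c PySem.Set.empty)) =
      pvBRows ((c : Nat) : Int) none (done ++ rest) := by
  induction rest generalizing done with
  | nil => simp
  | cons r rest ih =>
    rw [List.length_cons, List.range'_succ, List.foldl_cons]
    have hprev : ((pvBRows ((c : Nat) : Int) none done).getLast? = none ∧
          pvBRows ((c : Nat) : Int) none done = []) ∨
        (∃ pr, (pvBRows ((c : Nat) : Int) none done).getLast? = some pr ∧
          (pvBRows ((c : Nat) : Int) none done).getLast? = some pr) := by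
      cases hB : (pvBRows ((c : Nat) : Int) none done).getLast? with
      | none => exact Or.inl ⟨rfl, List.getLast?_eq_none_iff.mp hB⟩
      | some pr => exact Or.inr ⟨pr, rfl, rfl⟩
    have hr : r = PySem.List.pyGetD (done ++ r :: rest)
        ((pvBRows ((c : Nat) : Int) none done).length : Int) [] := by
      rw [length_pvBRows, PySem.List.pyGetD_natCast, getD_append_mid]
    have hstep := inner_inv (done ++ r :: rest) c (pvBRows ((c : Nat) : Int) none done)
      (List.replicate rest.length (List.replicate c PySem.Set.empty))
      ((pvBRows ((c : Nat) : Int) none done).getLast?) r hprev ⟨rest.length, rfl⟩ hr c []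
    simp only [List.length_nil, List.nil_append] at hstep
    have h1 : (PySem.List.pyRange 0 ((c : Nat) : Int)).foldl
          (pvStepA (done ++ r :: rest) ((done.length : Nat) : Int))
          (pvBRows ((c : Nat) : Int) none done ++
            List.replicate (rest.length + 1) (List.replicate c PySem.Set.empty))
        = pvBRows ((c : Nat) : Int) none (done ++ [r]) ++
            List.replicate rest.length (List.replicate c PySem.Set.empty) := by
      rw [pyRange_foldl_eq, List.replicate_succ, ← length_pvBRows ((c : Nat) : Int) none done]
      rw [hstep, ← pvExtendRow_eq_range' c]
      rw [pvBRows_append ((c : Nat) : Int) none done [r]]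
      simp [pvBRows]
    rw [h1]
    have := ih (done ++ [r])
    simp only [List.length_append, List.length_singleton, List.append_assoc,
      List.singleton_append] at this ⊢
    exact this

-- [f(...) for _ in range(n)] with a constant body is replicate
theorem pyRange_map_const {α : Type} (n : Nat) (x : α) :
    (PySem.List.pyRange 0 ((n : Nat) : Int)).map (fun _ => x) = List.replicate n x := by
  rw [PySem.List.pyRange_zero_natCast, List.map_map]
  simp only [Function.comp_def]
  rw [List.map_const', List.length_range]

-- ---- the common cell description pvC, and both sides reduced to it ----

-- pvC grid i j = the set of path sums from (0,0) to (i,j), written exactly in B's recursion shape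
def pvC (grid : List (List Int)) (i j : Nat) : PySem.Set Int :=
  if i = 0 ∧ j = 0 then PySem.Set.ofList [(grid.getD 0 []).getD 0 0]
  else
    let g := (grid.getD i []).getD j 0
    let s1 : PySem.Set Int :=
      if 0 < i then
        PySem.Set.union PySem.Set.empty
          (PySem.Set.ofList ((pvC grid (i - 1) j).map (fun v => v + g)))
      else PySem.Set.empty
    if 0 < j then
      PySem.Set.union s1 (PySem.Set.ofList ((pvC grid i (j - 1)).map (fun v => v + g)))
    else s1
termination_by i + j
decreasing_by all_goals omega

theorem nodup_pvC (grid : List (List Int)) (i j : Nat) : (pvC grid i j).Nodup := by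
  rw [pvC]
  split
  · exact PySem.Set.nodup_ofList _
  · rename_i hnot
    by_cases hi : 0 < i <;> by_cases hj : 0 < j <;> simp only [hi, hj, if_true, if_false]
    · exact PySem.Set.nodup_union _ _ (PySem.Set.nodup_union _ _ List.nodup_nil)
    · exact PySem.Set.nodup_union _ _ List.nodup_nil
    · exact PySem.Set.nodup_union _ _ List.nodup_nil
    · omega

-- union with a deduplicated second argument is union with the raw one
theorem union_ofList_right (s : PySem.Set Int) (l : List Int) :
    PySem.Set.union s (PySem.Set.ofList l) = PySem.Set.union s l := by
  show PySem.Set.update s (PySem.Set.ofList l) = PySem.Set.update s l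
  rw [PySem.Set.update_eq_append_filter, PySem.Set.update_eq_append_filter,
    PySem.Set.ofList_ofList]

-- update distributes over an injective map
theorem map_addg_update (g : Int) (X Y : List Int) :
    (PySem.Set.update X Y).map (fun v => v + g) =
      PySem.Set.update (X.map (fun v => v + g)) (Y.map (fun v => v + g)) := by
  induction Y generalizing X with
  | nil => simp [PySem.Set.update]
  | cons y Y ih =>
    rw [List.map_cons, PySem.Set.update_cons, PySem.Set.update_cons, ih]
    congr 1
    rw [PySem.Set.add_eq_ite, PySem.Set.add_eq_ite]
    by_cases hy : y ∈ X
    · simp [hy, List.mem_map_of_mem hy]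
    · have : y + g ∉ X.map (fun v => v + g) := by
        intro hm
        rcases List.mem_map.mp hm with ⟨z, hz, hzy⟩
        have : z = y := by omega
        exact hy (this ▸ hz)
      simp [hy, this]

-- ---- the row builder's cells are pvC ----

-- pvExtendRow in last-step-first form
def pvRowAcc (prev : Option (List (PySem.Set Int))) (row : List Int) : Nat → List (PySem.Set Int)
  | 0 => []
  | k + 1 => pvStepB prev row (pvRowAcc prev row k) ((pvRowAcc prev row k).length : Int)

theorem length_pvRowAcc (prev : Option (List (PySem.Set Int))) (row : List Int) (k : Nat) :
    (pvRowAcc prev row k).length = k := by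
  induction k with
  | zero => rfl
  | succ k ih => simp [pvRowAcc, pvStepB, ih]

theorem pvExtendRow_eq_rowAcc (c : Nat) (prev : Option (List (PySem.Set Int))) (row : List Int) :
    pvExtendRow ((c : Nat) : Int) prev row = pvRowAcc prev row c := by
  rw [pvExtendRow_eq_range']
  induction c with
  | zero => rfl
  | succ c ih =>
    rw [show c + 1 = c + 1 from rfl, List.range'_concat, List.foldl_append, ih]
    simp only [List.foldl_cons, List.foldl_nil, pvRowAcc, length_pvRowAcc, Nat.zero_add,
      Nat.one_mul]

-- preds of pvStepB, named (pvStepB_eq is definitional)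
def pvPreds (prev : Option (List (PySem.Set Int))) (cur : List (PySem.Set Int)) (j : Int) :
    PySem.Set Int :=
  if prev.isNone && j == 0 then PySem.Set.ofList [(0 : Int)]
  else
    let p : PySem.Set Int :=
      match prev with
      | some pr => PySem.Set.union PySem.Set.empty (PySem.List.pyGetD pr j PySem.Set.empty)
      | none => PySem.Set.empty
    if cur.isEmpty then p else PySem.Set.union p (PySem.List.pyGetD cur (-1) PySem.Set.empty)

theorem pvStepB_eq (prev : Option (List (PySem.Set Int))) (row : List Int)
    (cur : List (PySem.Set Int)) (j : Int) :
    pvStepB prev row cur j = cur ++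
      [PySem.Set.ofList ((pvPreds prev cur j).map
        (fun v => v + PySem.List.pyGetD row j 0))] := rfl

theorem pvC_succ (grid : List (List Int)) (i j : Nat) (h : ¬(i = 0 ∧ j = 0)) :
    pvC grid i j =
      (let g := (grid.getD i []).getD j 0
       let s1 : PySem.Set Int :=
         if 0 < i then
           PySem.Set.union PySem.Set.empty
             (PySem.Set.ofList ((pvC grid (i - 1) j).map (fun v => v + g)))
         else PySem.Set.empty
       if 0 < j then
         PySem.Set.union s1 (PySem.Set.ofList ((pvC grid i (j - 1)).map (fun v => v + g)))
       else s1) := by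
  rw [pvC, if_neg h]

-- a set built by ofList / union-from-empty collapses
theorem union_empty_nodup (X : PySem.Set Int) (hX : X.Nodup) :
    PySem.Set.union PySem.Set.empty X = X :=
  PySem.Set.ofList_eq_self_of_nodup _ hX

theorem rowAcc_cells (grid : List (List Int)) (c i : Nat)
    (prev : Option (List (PySem.Set Int)))
    (hp : (i = 0 ∧ prev = none) ∨
      (0 < i ∧ ∃ pr, prev = some pr ∧ pr.length = c ∧
        ∀ j, j < c → pr.getD j PySem.Set.empty = pvC grid (i - 1) j)) :
    ∀ k, k ≤ c → ∀ j, j < k →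
      (pvRowAcc prev (grid.getD i []) k).getD j PySem.Set.empty = pvC grid i j := by
  intro k
  induction k with
  | zero => intro _ j hj; omega
  | succ k ih =>
    intro hk j hj
    have ihk := ih (by omega)
    set row := grid.getD i [] with hrow
    have hcl : (pvRowAcc prev row k).length = k := length_pvRowAcc prev row k
    set cur := pvRowAcc prev row k with hcur
    have hstep : pvRowAcc prev row (k + 1) = pvStepB prev row cur ((k : Nat) : Int) := by
      rw [pvRowAcc, ← hcur, hcl]
    rw [hstep, pvStepB_eq]
    by_cases hjk : j < k
    · rw [getD_append_lt cur _ j _ (by omega)]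
      exact ihk j hjk
    · have hjeq : j = k := by omega
      subst hjeq
      have hmid : (cur ++ [PySem.Set.ofList ((pvPreds prev cur ((j : Nat) : Int)).map
          (fun v => v + PySem.List.pyGetD row ((j : Nat) : Int) 0))]).getD j PySem.Set.empty
          = PySem.Set.ofList ((pvPreds prev cur ((j : Nat) : Int)).map
            (fun v => v + PySem.List.pyGetD row ((j : Nat) : Int) 0)) := by
        have := getD_append_mid cur
          (PySem.Set.ofList ((pvPreds prev cur ((j : Nat) : Int)).map
            (fun v => v + PySem.List.pyGetD row ((j : Nat) : Int) 0))) []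
          (PySem.Set.empty : PySem.Set Int)
        rw [hcl] at this
        exact this
      rw [hmid]
      simp only [PySem.List.pyGetD_natCast]
      rcases hp with ⟨hi0, hpn⟩ | ⟨hipos, pr, hpe, hprl, hprc⟩
      · subst hi0; subst hpn
        by_cases hk0 : j = 0
        · subst hk0
          have hpv : pvPreds none cur ((0 : Nat) : Int) = PySem.Set.ofList [(0 : Int)] := by
            simp [pvPreds]
          rw [hpv, pvC, if_pos ⟨rfl, rfl⟩]
          simp [hrow, show (PySem.Set.ofList [(0 : Int)]) = [0] from rfl]
        · have hcne : cur ≠ [] := by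
            intro h; rw [h] at hcl; simp at hcl; omega
          have hlast : PySem.List.pyGetD cur (-1) PySem.Set.empty = pvC grid 0 (j - 1) := by
            rw [PySem.List.pyGetD_neg_one cur _ hcne, ← getD_pred_getLast cur _ hcne, hcl]
            exact ihk (j - 1) (by omega)
          have hpv : pvPreds none cur ((j : Nat) : Int)
              = PySem.Set.ofList (pvC grid 0 (j - 1)) := by
            rw [pvPreds]
            have h1 : ((Option.none : Option (List (PySem.Set Int))).isNone
                && (((j : Nat) : Int) == 0)) = false := by
              simp; omega
            have h2 : cur.isEmpty = false := by simp [hcne]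
            simp only [h1, Bool.false_eq_true, if_false, h2, hlast]
            rfl
          rw [hpv, PySem.Set.ofList_eq_self_of_nodup _ (nodup_pvC grid 0 (j - 1))]
          rw [pvC_succ grid 0 j (by omega)]
          simp only [Nat.lt_irrefl, if_false, Nat.pos_of_ne_zero hk0, if_true, ← hrow]
          exact (PySem.Set.ofList_ofList _).symm
      · subst hpe
        have hprj : PySem.List.pyGetD pr ((j : Nat) : Int) PySem.Set.empty
            = pvC grid (i - 1) j := by
          rw [PySem.List.pyGetD_natCast]
          exact hprc j (by omega)
        have hQn := nodup_pvC grid (i - 1) j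
        by_cases hk0 : j = 0
        · subst hk0
          have h2 : cur.isEmpty = true := by
            rw [List.isEmpty_iff, ← List.length_eq_zero_iff, hcl]
          have hpv : pvPreds (some pr) cur ((0 : Nat) : Int)
              = PySem.Set.ofList (pvC grid (i - 1) 0) := by
            rw [pvPreds]
            simp only [Option.isNone_some, Bool.false_and, Bool.false_eq_true, if_false, h2,
              if_true, hprj]
            rfl
          rw [hpv, PySem.Set.ofList_eq_self_of_nodup _ hQn]
          rw [pvC_succ grid i 0 (by omega)]
          simp only [hipos, if_true, Nat.lt_irrefl, if_false, ← hrow]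
          exact (PySem.Set.ofList_ofList _).symm
        · have hcne : cur ≠ [] := by
            intro h; rw [h] at hcl; simp at hcl; omega
          have h2 : cur.isEmpty = false := by simp [hcne]
          have hlast : PySem.List.pyGetD cur (-1) PySem.Set.empty = pvC grid i (j - 1) := by
            rw [PySem.List.pyGetD_neg_one cur _ hcne, ← getD_pred_getLast cur _ hcne, hcl]
            exact ihk (j - 1) (by omega)
          have hpv : pvPreds (some pr) cur ((j : Nat) : Int)
              = PySem.Set.union (PySem.Set.ofList (pvC grid (i - 1) j)) (pvC grid i (j - 1)) := by
            rw [pvPreds]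
            simp only [Option.isNone_some, Bool.false_and, Bool.false_eq_true, if_false, h2,
              hprj, hlast]
            rfl
          rw [hpv, PySem.Set.ofList_eq_self_of_nodup _ hQn]
          set Q := pvC grid (i - 1) j with hQdef
          set P2 := pvC grid i (j - 1) with hP2def
          have hP2n : P2.Nodup := nodup_pvC grid i (j - 1)
          have hQfn : (Q.map (fun v => v + row.getD j 0)).Nodup :=
            List.Nodup.map (add_left_injective _) hQn
          have lhs : PySem.Set.ofList ((PySem.Set.union Q P2).map (fun v => v + row.getD j 0))
              = PySem.Set.update (Q.map (fun v => v + row.getD j 0))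
                  (P2.map (fun v => v + row.getD j 0)) := by
            show PySem.Set.ofList ((PySem.Set.update Q P2).map _) = _
            rw [map_addg_update]
            exact PySem.Set.ofList_eq_self_of_nodup _ (PySem.Set.nodup_update _ _ hQfn)
          rw [lhs, pvC_succ grid i j (by omega)]
          simp only [hipos, if_true, Nat.pos_of_ne_zero hk0, ← hrow, ← hQdef, ← hP2def]
          rw [union_empty_nodup _ (PySem.Set.nodup_ofList _),
            PySem.Set.ofList_eq_self_of_nodup _ hQfn, union_ofList_right]
          rfl

-- rows of the model at index i
theorem getD_pvBRows (C : Int) (rs : List (List Int)) (prev : Option (List (PySem.Set Int))) :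
    ∀ i, i < rs.length →
      (pvBRows C prev rs).getD i [] =
        pvExtendRow C (if i = 0 then prev else some ((pvBRows C prev rs).getD (i - 1) []))
          (rs.getD i []) := by
  induction rs generalizing prev with
  | nil => intro i hi; simp at hi
  | cons r rs ih =>
    intro i hi
    cases i with
    | zero => simp [pvBRows]
    | succ i =>
      have hi' : i < rs.length := by simpa using hi
      have := ih (some (pvExtendRow C prev r)) i hi'
      simp only [pvBRows, List.getD_cons_succ, List.getD_cons_zero] at this ⊢
      rw [this]
      cases i with
      | zero => simp [pvBRows]
      | succ i => simp

-- the model's cells are pvC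
theorem pvBRows_cells (grid : List (List Int)) (c : Nat) :
    ∀ i, i < grid.length → ∀ j, j < c →
      ((pvBRows ((c : Nat) : Int) none grid).getD i []).getD j PySem.Set.empty =
        pvC grid i j := by
  intro i
  induction i using Nat.strong_induction_on with
  | _ i IH =>
    intro hi j hj
    rw [getD_pvBRows ((c : Nat) : Int) grid none i hi]
    by_cases hi0 : i = 0
    · subst hi0
      rw [if_pos rfl, pvExtendRow_eq_rowAcc]
      exact rowAcc_cells grid c 0 none (Or.inl ⟨rfl, rfl⟩) c le_rfl j hj
    · rw [if_neg hi0]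
      set R := (pvBRows ((c : Nat) : Int) none grid).getD (i - 1) [] with hR
      have hR2 := getD_pvBRows ((c : Nat) : Int) grid none (i - 1) (by omega)
      have hRlen : R.length = c := by rw [hR, hR2, pvExtendRow_eq_rowAcc, length_pvRowAcc]
      have hRcells : ∀ j', j' < c → R.getD j' PySem.Set.empty = pvC grid (i - 1) j' :=
        fun j' hj' => IH (i - 1) (by omega) (by omega) j' hj'
      rw [pvExtendRow_eq_rowAcc]
      exact rowAcc_cells grid c i (some R)
        (Or.inr ⟨by omega, R, rfl, hRlen, hRcells⟩) c le_rfl j hj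

-- ---- B's memoized recursion computes pvC ----

def pvMemoOk (grid : List (List Int)) (memo : PySem.Dict (Int × Int) (PySem.Set Int)) : Prop :=
  ∀ k s, memo.get? k = some s → ∃ a b : Nat, k = ((a : Int), (b : Int)) ∧ s = pvC grid a b

theorem memoOk_insert (grid : List (List Int)) (d : PySem.Dict (Int × Int) (PySem.Set Int))
    (a b : Nat) (h : pvMemoOk grid d) :
    pvMemoOk grid (d.insert ((a : Int), (b : Int)) (pvC grid a b)) := by
  intro k s hks
  rw [PySem.Dict.get?_insert] at hks
  split at hks
  · rename_i hkk
    exact ⟨a, b, hkk, (Option.some.injEq _ _).mp hks.symm⟩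
  · exact h _ _ hks

theorem pvReach_eq_pvC (grid : List (List Int)) :
    ∀ fuel i j memo, i + j < fuel → pvMemoOk grid memo →
      (pvReach grid fuel i j memo).2 = pvC grid i j ∧
        pvMemoOk grid (pvReach grid fuel i j memo).1 := by
  intro fuel
  induction fuel with
  | zero => intro i j memo h _; omega
  | succ fuel IH =>
    intro i j memo h hok
    cases hget : memo.get? ((i : Int), (j : Int)) with
    | some s =>
      obtain ⟨a, b, hk, hs⟩ := hok _ _ hget
      have hab : a = i ∧ b = j := by
        have h1 := congrArg Prod.fst hk
        have h2 := congrArg Prod.snd hk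
        simp only at h1 h2
        omega
      simp only [pvReach, hget]
      exact ⟨by rw [hs, hab.1, hab.2], hok⟩
    | none =>
      by_cases hbase : i = 0 ∧ j = 0
      · obtain ⟨rfl, rfl⟩ := hbase
        have hs : PySem.Set.ofList [PySem.List.pyGetD (PySem.List.pyGetD grid 0 []) 0 0]
            = pvC grid 0 0 := by
          rw [pvC, if_pos ⟨rfl, rfl⟩]
          simp [PySem.List.pyGetD_zero]
        refine ⟨?_, ?_⟩
        · simp only [pvReach, hget]
          simpa using hs
        · simp only [pvReach, hget]
          have hins := memoOk_insert grid memo 0 0 hok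
          rw [← hs] at hins
          simpa using hins
      · simp only [pvReach, hget, if_neg hbase]
        have hg : PySem.List.pyGetD (PySem.List.pyGetD grid (i : Int) []) (j : Int) 0
            = (grid.getD i []).getD j 0 := by
          simp [PySem.List.pyGetD_natCast]
        by_cases hi : 0 < i <;> by_cases hj : 0 < j
        · have h1 := IH (i - 1) j memo (by omega) hok
          have h2 := IH i (j - 1) (pvReach grid fuel (i - 1) j memo).1 (by omega) h1.2
          simp only [hi, hj, if_true, h1.1, h2.1, hg]
          have hval : PySem.Set.union
              (PySem.Set.union PySem.Set.empty
                (PySem.Set.ofList ((pvC grid (i - 1) j).map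
                  (fun v => v + (grid.getD i []).getD j 0))))
              (PySem.Set.ofList ((pvC grid i (j - 1)).map
                (fun v => v + (grid.getD i []).getD j 0)))
              = pvC grid i j := by
            rw [pvC_succ grid i j hbase]
            simp only [hi, hj, if_true]
          rw [hval]
          exact ⟨rfl, memoOk_insert grid _ i j h2.2⟩
        · have h1 := IH (i - 1) j memo (by omega) hok
          simp only [hi, hj, if_true, if_false, h1.1, hg]
          have hval : PySem.Set.union PySem.Set.empty
              (PySem.Set.ofList ((pvC grid (i - 1) j).map
                (fun v => v + (grid.getD i []).getD j 0)))
              = pvC grid i j := by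
            rw [pvC_succ grid i j hbase]
            simp only [hi, hj, if_true, if_false]
          rw [hval]
          exact ⟨rfl, memoOk_insert grid _ i j h1.2⟩
        · have h2 := IH i (j - 1) memo (by omega) hok
          simp only [hi, hj, if_true, if_false, h2.1, hg]
          have hval : PySem.Set.union PySem.Set.empty
              (PySem.Set.ofList ((pvC grid i (j - 1)).map
                (fun v => v + (grid.getD i []).getD j 0)))
              = pvC grid i j := by
            rw [pvC_succ grid i j hbase]
            simp only [hi, hj, if_true, if_false]
          rw [hval]
          exact ⟨rfl, memoOk_insert grid _ i j h2.2⟩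
        · omega

-- ===== VERDICT (by name: the statements are the Claim_ definitions above) =====
theorem uniqueWeightedPaths_spec : Claim_equal_uniqueWeightedPaths := by
  intro grid _ hpre
  unfold Spec_uniqueWeightedPaths
  obtain ⟨hne, -, -⟩ := hpre
  obtain ⟨g0, gr, rfl⟩ := List.exists_cons_of_ne_nil hne
  by_cases hc : g0.length = 0
  · have hg0 : g0 = [] := List.length_eq_zero_iff.mp hc
    subst hg0
    simp [uniqueWeightedPaths, uniqueWeightedPaths_alt, PySem.List.len_eq,
      PySem.List.pyGetD_zero_cons]
  · have hg0ne : g0 ≠ [] := by intro h; subst h; exact hc rfl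
    have hlen0 : ((((g0 :: gr).length : Nat) : Int) == 0) = false := by
      simp
      omega
    have hlenc : (((g0.length : Nat) : Int) == 0) = false := by
      simp
      omega
    have hBne : pvBRows ((g0.length : Nat) : Int) none (g0 :: gr) ≠ [] := by
      intro h
      have := length_pvBRows ((g0.length : Nat) : Int) none (g0 :: gr)
      rw [h] at this
      simp at this
    have houter := outer_inv g0.length [] (g0 :: gr)
    simp only [List.nil_append, List.length_nil] at houter
    rw [show pvBRows ((g0.length : Nat) : Int) none [] = [] from rfl, List.nil_append] at houter
    have hok : pvMemoOk (g0 :: gr) PySem.Dict.empty := by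
      intro k s h
      simp [PySem.Dict.get?_empty] at h
    have hti : ((((g0 :: gr).length : Nat) : Int) - 1).toNat = gr.length := by
      simp
    have htj : (((g0.length : Nat) : Int) - 1).toNat = g0.length - 1 := by omega
    have hreach := pvReach_eq_pvC (g0 :: gr) (gr.length + (g0.length - 1) + 1) gr.length
      (g0.length - 1) PySem.Dict.empty (by omega) hok
    have hrow := getD_pvBRows ((g0.length : Nat) : Int) (g0 :: gr) none gr.length (by simp)
    have hrowlen : ((pvBRows ((g0.length : Nat) : Int) none (g0 :: gr)).getD gr.length
        []).length = g0.length := by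
      rw [hrow, pvExtendRow_eq_rowAcc, length_pvRowAcc]
    have hrowne : (pvBRows ((g0.length : Nat) : Int) none (g0 :: gr)).getD gr.length [] ≠ [] := by
      intro h
      rw [h] at hrowlen
      simp at hrowlen
      omega
    have hcell := pvBRows_cells (g0 :: gr) g0.length gr.length (by simp) (g0.length - 1)
      (by omega)
    simp only [uniqueWeightedPaths, uniqueWeightedPaths_alt, PySem.List.len_eq,
      PySem.List.pyGetD_zero_cons, hlen0, hlenc, Bool.or_self, Bool.or_false, Bool.false_or,
      Bool.false_eq_true, if_false, pyRange_map_const, hti, htj]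
    rw [pyRange_foldl_eq (g0 :: gr).length, houter,
      PySem.List.pyGetD_neg_one _ _ hBne, hreach.1]
    have hgl : (pvBRows ((g0.length : Nat) : Int) none (g0 :: gr)).getLast hBne
        = (pvBRows ((g0.length : Nat) : Int) none (g0 :: gr)).getD gr.length [] := by
      have := getD_pred_getLast (pvBRows ((g0.length : Nat) : Int) none (g0 :: gr)) [] hBne
      rw [length_pvBRows] at this
      simpa using this.symm
    rw [hgl, PySem.List.pyGetD_neg_one _ _ hrowne]
    have hgl2 : ((pvBRows ((g0.length : Nat) : Int) none (g0 :: gr)).getD gr.length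
        []).getLast hrowne = pvC (g0 :: gr) gr.length (g0.length - 1) := by
      rw [← getD_pred_getLast _ PySem.Set.empty hrowne, hrowlen]
      exact hcell
    rw [hgl2, List.sum_eq_foldl]
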